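-- pv_equiv track=rewrite | github.com/Jinting101/Leetcode_Solution | 2110-number-of-smooth-descent-periods-of-a-stock/2110-number-of-smooth-descent-periods-of-a-stock.py | getDescentPeriods
-- ===== SOURCE A (Python) =====
-- from typing import List
--
-- def getDescentPeriods(prices: List[int]) -> int:
--     n = len(prices)
--     res = n
--     l = 0
--     for r in range(1, n):
--         dif = prices[r-1] - prices[r]
--         if dif == 1:
--             res += r - l
--         else:
--             l = r
--     return res
-- ===== SOURCE B (Python) =====
-- def getDescentPeriods(prices):
--     # Partition into maximal smooth-descent runs; each run of L elements
--     # contributes L*(L+1)//2 subarrays (triangular closed form).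
--     it = iter(prices)
--     prev = next(it, None)
--     if prev is None:
--         return 0
--     total, run = 0, 1
--     for p in it:
--         if prev - p == 1:
--             run += 1
--         else:
--             total += run * (run + 1) // 2
--             run = 1
--         prev = p
--     return total + run * (run + 1) // 2
-- ===== Notes on version B (the rewrite author's own statement) =====
-- stated objective: alternative
-- what changed: B partitions the list into maximal smooth-descent runs and adds the triangular closed form L*(L+1)//2 per run, instead of A's per-index accumulation of r-l over range(1,n).
import Mathlib
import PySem

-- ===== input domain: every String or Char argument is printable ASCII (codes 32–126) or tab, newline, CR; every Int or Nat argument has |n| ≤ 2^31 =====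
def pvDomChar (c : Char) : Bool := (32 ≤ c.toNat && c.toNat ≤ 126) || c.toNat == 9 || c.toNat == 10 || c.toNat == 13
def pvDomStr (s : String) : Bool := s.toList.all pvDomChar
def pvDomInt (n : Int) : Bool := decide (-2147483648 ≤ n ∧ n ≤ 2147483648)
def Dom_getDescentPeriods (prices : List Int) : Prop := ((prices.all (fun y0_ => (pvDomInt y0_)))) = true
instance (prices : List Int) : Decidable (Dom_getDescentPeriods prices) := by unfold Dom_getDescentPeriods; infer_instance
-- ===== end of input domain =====

-- B replaces A's per-index accumulation of r-l with a run-length decomposition: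
-- it sums the triangular closed form run*(run+1)//2 per maximal smooth-descent run
-- (objective: alternative decomposition, same O(n) cost).

-- ===== PORT A =====
-- literal transliteration of A's loop body: dif = prices[r-1] - prices[r]; …
def stepA (prices : List Int) (st : Int × Int) (r : Int) : Int × Int :=
  let dif := PySem.List.pyGetD prices (r - 1) 0 - PySem.List.pyGetD prices r 0
  if dif = 1 then (st.1 + (r - st.2), st.2) else (st.1, r)

-- res = n; l = 0; for r in range(1, n): …
def getDescentPeriods (prices : List Int) : Int :=
  let n : Int := prices.length
  let s := (PySem.List.pyRange 1 n 1).foldl (stepA prices) (n, 0)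
  s.1

-- ===== PORT B =====
-- transliteration of Source B's loop: prev carried, run length reset/extended, triangular sums
def altGo (prev run total : Int) : List Int → Int
  | [] => total + PySem.Int.floordiv (run * (run + 1)) 2
  | p :: rest =>
    if prev - p = 1 then altGo p (run + 1) total rest
    else altGo p 1 (total + PySem.Int.floordiv (run * (run + 1)) 2) rest

def getDescentPeriods_alt : List Int → Int
  | [] => 0
  | p :: rest => altGo p 1 0 rest

-- ===== PRECONDITION & SPEC =====
def Spec_getDescentPeriods (prices : List Int) (out : Int) : Prop := out = getDescentPeriods_alt prices
instance (prices : List Int) (out : Int) : Decidable (Spec_getDescentPeriods prices out) := by unfold Spec_getDescentPeriods; infer_instance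

-- ===== CLAIM (what is proved, stated in full; the proofs are below) =====
def Claim_equal_getDescentPeriods : Prop := ∀ (prices : List Int), Dom_getDescentPeriods prices → Spec_getDescentPeriods prices (getDescentPeriods prices)

-- ===== LEMMAS AND PROOFS =====

-- structural reformulation of A's indexed loop: state (res, k) with k = r - l
def aGo (prev res k : Int) : List Int → Int
  | [] => res
  | p :: rest => if prev - p = 1 then aGo p (res + k) (k + 1) rest else aGo p res 1 rest

-- A's fold over range(i+1, n) equals aGo on the suffix, with k = (i+1) - l
lemma foldA (prices : List Int) : ∀ (rest : List Int) (i : Nat) (prev : Int),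
    prices.drop i = prev :: rest → ∀ (res l : Int),
    ((PySem.List.pyRange ((i : Int) + 1) (prices.length : Int) 1).foldl
      (stepA prices) (res, l)).1
    = aGo prev res ((i : Int) + 1 - l) rest := by
  intro rest
  induction rest with
  | nil =>
    intro i prev h res l
    have hlen : prices.length = i + 1 := by
      have := congrArg List.length h
      simp [List.length_drop] at this
      omega
    rw [PySem.List.pyRange_one_eq_nil (by omega)]
    simp [aGo]
  | cons p rest' ih =>
    intro i prev h res l
    have hlen : i + 2 ≤ prices.length := by
      have := congrArg List.length h
      simp [List.length_drop] at this
      omega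
    have hgi : prices[i]? = some prev := by
      rw [← List.head?_drop, h]; rfl
    have hdrop : prices.drop (i + 1) = p :: rest' := by
      have ht : prices.drop (i + 1) = (prices.drop i).tail := by rw [List.tail_drop]
      rw [ht, h]; rfl
    have hgi1 : prices[i + 1]? = some p := by
      rw [← List.head?_drop, hdrop]; rfl
    have g1 : prices.getD i 0 = prev := by simp [List.getD, hgi]
    have g2 : prices.getD (i + 1) 0 = p := by simp [List.getD, hgi1]
    rw [PySem.List.pyRange_one_cons (by exact_mod_cast by omega), List.foldl_cons]
    have e2 : ((i : Int) + 1) = ((i + 1 : Nat) : Int) := by push_cast; ring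
    have hstep : stepA prices (res, l) ((i : Int) + 1)
        = if prev - p = 1 then (res + ((i : Int) + 1 - l), l) else (res, (i : Int) + 1) := by
      show (let dif := _; if dif = 1 then _ else _) = _
      rw [show ((i : Int) + 1 - 1) = ((i : Nat) : Int) by ring, e2]
      simp only [PySem.List.pyGetD_natCast]
      rw [g1, g2]
    rw [hstep]
    by_cases hc : prev - p = 1
    · rw [if_pos hc]
      have hrec := ih (i + 1) p hdrop (res + ((i : Int) + 1 - l)) l
      rw [show (((i + 1 : Nat) : Int) + 1) = (i : Int) + 1 + 1 by push_cast; ring] at hrec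
      rw [hrec]
      show _ = if prev - p = 1 then _ else _
      rw [if_pos hc]
      congr 1
      ring
    · rw [if_neg hc]
      have hrec := ih (i + 1) p hdrop res ((i : Int) + 1)
      rw [show (((i + 1 : Nat) : Int) + 1) = (i : Int) + 1 + 1 by push_cast; ring] at hrec
      rw [hrec]
      show _ = if prev - p = 1 then _ else _
      rw [if_neg hc]
      congr 1
      ring

-- even triangular numbers: run*(run+1)//2 under the invariant 2*t = L*(L-1)
lemma tri_eq (L t : Int) (h : 2 * t = L * (L - 1)) :
    PySem.Int.floordiv (L * (L + 1)) 2 = t + L := by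
  rw [PySem.Int.floordiv_eq_iff_of_pos (by norm_num)]
  constructor <;> nlinarith

-- the run-length invariant linking A's per-element sums to B's triangular sums
lemma aGo_eq_altGo : ∀ (rest : List Int) (prev L total t : Int), 2 * t = L * (L - 1) →
    aGo prev (total + t + L + (rest.length : Int)) L rest = altGo prev L total rest := by
  intro rest
  induction rest with
  | nil =>
    intro prev L total t h
    simp only [aGo, altGo, List.length_nil, Nat.cast_zero, add_zero]
    rw [tri_eq L t h]
    ring
  | cons p rest' ih =>
    intro prev L total t h
    simp only [aGo, altGo]
    by_cases hc : prev - p = 1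
    · simp only [if_pos hc]
      have := ih p (L + 1) total (t + L) (by ring_nf; nlinarith)
      rw [show total + t + L + ((p :: rest').length : Int) + L
            = total + (t + L) + (L + 1) + (rest'.length : Int) by
          simp only [List.length_cons]; push_cast; ring]
      exact this
    · simp only [if_neg hc]
      rw [tri_eq L t h]
      have := ih p 1 (total + (t + L)) 0 (by ring)
      rw [show total + t + L + ((p :: rest').length : Int)
            = total + (t + L) + 0 + 1 + (rest'.length : Int) by
          simp only [List.length_cons]; push_cast; ring]
      exact this

-- ===== VERDICT (by name: the statement is the Claim_ definition above) =====
theorem getDescentPeriods_spec : Claim_equal_getDescentPeriods := by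
  intro prices _
  unfold Spec_getDescentPeriods
  cases prices with
  | nil => decide
  | cons p rest =>
    have hf := foldA (p :: rest) rest 0 p (by simp) (((p :: rest).length : Nat) : Int) 0
    simp only [Nat.cast_zero, zero_add] at hf
    have h3 : aGo p (((p :: rest).length : Nat) : Int) (1 - 0) rest
        = getDescentPeriods_alt (p :: rest) := by
      rw [show (1 : Int) - 0 = 1 by ring]
      have h2 := aGo_eq_altGo rest p 1 0 0 (by ring)
      rw [show (0 : Int) + 0 + 1 + (rest.length : Int) = (((p :: rest).length : Nat) : Int) by
        simp only [List.length_cons]; push_cast; ring] at h2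
      simpa [getDescentPeriods_alt] using h2
    exact hf.trans h3
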